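-- pv_equiv track=rewrite | github.com/bahailu-abera/Competitive-programming | binary_search/compare_strings_by_freq.py | f
-- ===== SOURCE A (Python) =====
-- from collections import defaultdict
--
-- def f(s):
--     freq = defaultdict(int)
--     smallest = s[0]
--     for ch in s:
--         freq[ch] += 1
--         if ch < smallest:
--             smallest = ch
--     return freq[smallest]
-- ===== SOURCE B (Python) =====
-- def f(s):
--     t = sorted(s)
--     smallest = t[0]
--     i = 0
--     n = len(t)
--     while i < n and t[i] == smallest:
--         i += 1
--     return i
-- ===== Notes on version B (the rewrite author's own statement) =====
-- stated objective: alternative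
-- what changed: Replaces the single-pass frequency-dict-plus-running-min with sort-then-count-the-leading-run: since sorted(s) is ascending, all copies of the smallest character form the prefix, so its count is the length of that run.
import Mathlib
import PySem

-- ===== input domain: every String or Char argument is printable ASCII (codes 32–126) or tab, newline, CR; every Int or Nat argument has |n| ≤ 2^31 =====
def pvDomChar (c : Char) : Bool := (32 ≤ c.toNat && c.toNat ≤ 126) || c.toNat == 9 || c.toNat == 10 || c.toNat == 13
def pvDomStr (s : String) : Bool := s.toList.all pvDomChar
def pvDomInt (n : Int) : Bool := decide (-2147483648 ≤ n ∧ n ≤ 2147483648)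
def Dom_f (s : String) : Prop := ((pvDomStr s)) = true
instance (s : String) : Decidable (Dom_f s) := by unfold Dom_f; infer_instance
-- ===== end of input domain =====

-- B replaces A's frequency-dict + running-min single pass by sort-then-count-the-leading-run
-- (alternative decomposition, not claimed faster). Both raise IndexError on "" (excluded by Pre_f).

-- ===== PORT A =====
def f (s : String) : Int :=
  -- smallest = s[0]  (IndexError on "" — excluded by Pre_f)
  let smallest0 := (PySem.Str.pyGet? s 0).getD ' '
  let r := s.toList.foldl
    (fun (st : PySem.Dict Char Int × Char) ch =>
      (st.1.modify ch 0 (· + 1), if ch < st.2 then ch else st.2))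
    (PySem.Dict.empty, smallest0)
  r.1.getD r.2 0

-- ===== PORT B =====
-- the while loop 'while i < n and t[i] == smallest: i += 1; return i' as structural recursion
def countRun : List Char → Char → Int
  | [], _ => 0
  | c :: rest, m => if c == m then 1 + countRun rest m else 0

def f_alt (s : String) : Int :=
  let t := PySem.List.sorted s.toList (fun c => c) false
  -- smallest = t[0]  (IndexError on "" — excluded by Pre_f)
  let smallest := (PySem.List.pyGet? t 0).getD ' '
  countRun t smallest

-- ===== PRECONDITION & SPEC =====
-- Pre_f excludes only the empty string, on which A's s[0] raises IndexError (B raises too).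
def Pre_f (s : String) : Prop := s ≠ ""
instance (s : String) : Decidable (Pre_f s) := by unfold Pre_f; infer_instance
def pvWitness_f : String := "abca"

def Spec_f (s : String) (out : Int) : Prop := out = f_alt s
instance (s : String) (out : Int) : Decidable (Spec_f s out) := by unfold Spec_f; infer_instance

-- ===== CLAIM (what is proved, stated in full; the proofs are below) =====
def Claim_equal_f : Prop := ∀ (s : String), Dom_f s → Pre_f s → Spec_f s (f s)

-- ===== LEMMAS AND PROOFS =====

-- the pair fold in A splits into its two independent component folds
theorem foldl_pair_split (l : List Char) (d : PySem.Dict Char Int) (m : Char) :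
    l.foldl
      (fun (st : PySem.Dict Char Int × Char) ch =>
        (st.1.modify ch 0 (· + 1), if ch < st.2 then ch else st.2)) (d, m)
    = (l.foldl (fun d ch => d.modify ch 0 (· + 1)) d,
       l.foldl (fun m ch => if ch < m then ch else m) m) := by
  induction l generalizing d m with
  | nil => rfl
  | cons c rest ih => simp [List.foldl, ih]

-- the running-min fold returns the seed or an element, and is ≤ the seed and every element
theorem foldl_min_props (l : List Char) (m0 : Char) :
    (l.foldl (fun m ch => if ch < m then ch else m) m0 = m0
      ∨ l.foldl (fun m ch => if ch < m then ch else m) m0 ∈ l)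
    ∧ l.foldl (fun m ch => if ch < m then ch else m) m0 ≤ m0
    ∧ ∀ x ∈ l, l.foldl (fun m ch => if ch < m then ch else m) m0 ≤ x := by
  induction l generalizing m0 with
  | nil => simp
  | cons c rest ih =>
    by_cases h : c < m0
    · have := ih c
      simp only [List.foldl, if_pos h]
      refine ⟨?_, ?_, ?_⟩
      · rcases this.1 with h1 | h1
        · exact Or.inr (by simp [h1])
        · exact Or.inr (by simp [h1])
      · exact le_trans this.2.1 (le_of_lt h)
      · intro x hx
        rcases List.mem_cons.mp hx with rfl | hx
        · exact this.2.1
        · exact this.2.2 x hx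
    · have := ih m0
      simp only [List.foldl, if_neg h]
      refine ⟨?_, this.2.1, ?_⟩
      · rcases this.1 with h1 | h1
        · exact Or.inl h1
        · exact Or.inr (List.mem_cons_of_mem _ h1)
      · intro x hx
        rcases List.mem_cons.mp hx with rfl | hx
        · exact le_trans this.2.1 (le_of_not_gt h)
        · exact this.2.2 x hx

-- on a sorted list whose head is a global minimum, the leading run length is the count
theorem countRun_eq_count (t : List Char) (m : Char)
    (hs : t.Pairwise (· ≤ ·)) (hmin : ∀ x ∈ t, m ≤ x) :
    countRun t m = (t.count m : Int) := by
  induction t with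
  | nil => simp [countRun]
  | cons c rest ih =>
    rcases List.pairwise_cons.mp hs with ⟨hc, hrest⟩
    by_cases h : c = m
    · subst h
      have : countRun (c :: rest) c = 1 + countRun rest c := by simp [countRun]
      rw [this, ih hrest (fun x hx => hc x hx)]
      simp
      ring
    · have hne : (c == m) = false := by simp [h]
      have hrun : countRun (c :: rest) m = 0 := by simp [countRun, hne]
      have hmc : m < c := lt_of_le_of_ne (hmin c (by simp)) (fun e => h e.symm)
      have hcount : (c :: rest).count m = 0 := by
        rw [List.count_eq_zero]
        intro hmem
        rcases List.mem_cons.mp hmem with hm | hmem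
        · exact h hm.symm
        · exact absurd (hc m hmem) (not_le.mpr hmc)
      rw [hrun, hcount]; simp

theorem f_eq_count (s : String) (c : Char) (rest : List Char) (hl : s.toList = c :: rest) :
    f s = ((c :: rest).count
      ((c :: rest).foldl (fun m ch => if ch < m then ch else m) c) : Int) := by
  unfold f
  rw [hl]
  have hget : PySem.Str.pyGet? s 0 = some c := by
    rw [show (0 : Int) = ((0 : Nat) : Int) from rfl, PySem.Str.pyGet?_natCast, hl]; rfl
  rw [hget]
  simp only [Option.getD_some, foldl_pair_split]
  rw [PySem.Dict.getD_foldl_modify_add_one]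
  simp [PySem.Dict.getD]

-- ===== VERDICT (by name: the statement is the Claim_ definition above) =====
theorem f_spec : Claim_equal_f := by
  intro s _ hpre
  unfold Spec_f
  obtain ⟨c, rest, hl⟩ : ∃ c rest, s.toList = c :: rest := by
    cases h : s.toList with
    | nil =>
      exfalso
      exact hpre (by rw [← String.ofList_toList (s := s), h])
    | cons a b => exact ⟨a, b, rfl⟩
  have hperm : (PySem.List.sorted s.toList (fun x => x) false).Perm s.toList :=
    PySem.List.sorted_perm s.toList _ _
  obtain ⟨m, trest, ht⟩ : ∃ m trest,
      PySem.List.sorted s.toList (fun x => x) false = m :: trest := by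
    cases h : PySem.List.sorted s.toList (fun x => x) false with
    | nil =>
      exfalso
      have := (PySem.List.sorted_eq_nil_iff (xs := s.toList) (key := fun x => x) (rev := false)).mp h
      rw [hl] at this; exact absurd this (List.cons_ne_nil c rest)
    | cons a b => exact ⟨a, b, rfl⟩
  have hmmem : m ∈ s.toList := hperm.mem_iff.mp (ht ▸ List.mem_cons_self)
  have hmle : ∀ y ∈ s.toList, m ≤ y := fun y hy =>
    PySem.List.key_head_sorted_le (xs := s.toList) (key := fun x => x) ht y hy
  have hA : f s = (s.toList.count
      ((c :: rest).foldl (fun m ch => if ch < m then ch else m) c) : Int) := by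
    rw [f_eq_count s c rest hl, hl]
  have hprops := foldl_min_props (c :: rest) c
  have hrl : (c :: rest).foldl (fun m ch => if ch < m then ch else m) c ∈ c :: rest := by
    rcases hprops.1 with h1 | h1
    · rw [h1]; exact List.mem_cons_self
    · exact h1
  have hrm : (c :: rest).foldl (fun m ch => if ch < m then ch else m) c = m := by
    refine le_antisymm (hprops.2.2 m ?_) (hmle _ ?_)
    · rw [← hl] at *; exact hmmem
    · rw [hl]; exact hrl
  have hB : f_alt s = (s.toList.count m : Int) := by
    unfold f_alt
    rw [ht]
    simp only [PySem.List.pyGet?_zero_cons, Option.getD_some]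
    rw [countRun_eq_count (m :: trest) m
        (by have := PySem.List.sorted_pairwise (xs := s.toList) (key := fun x => x); rwa [ht] at this)
        (by intro x hx; exact hmle x (hperm.mem_iff.mp (ht ▸ hx)))]
    have hcnt : (m :: trest).count m = s.toList.count m := (ht ▸ hperm).count_eq m
    rw [hcnt]
  rw [hA, hB, hrm]
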